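-- pv_equiv track=rewrite | github.com/Jessie1201/python_practice | interview_preparation/task1_1.py | solution
-- ===== SOURCE A (Python) =====
-- def solution(A,B):
--     maximum = 0
--     for i in range(2, B+1):
--         count = 0
--         while i**2 <= B:
--             i = i**2
--             count += 1
--         if i >= A:
--             maximum = max(maximum, count)
--     return maximum
-- ===== SOURCE B (Python) =====
-- def solution(A, B):
--     # Iterate over the squaring count c instead of over every base i:
--     # for each c >= 1 find the largest base imax with imax**(2**c) <= B by a
--     # short scan, and check whether that base's chain stops exactly at count c
--     # with a final value >= A.  Count 0 never beats the initial best of 0.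
--     best = 0
--     c = 1
--     while 2 ** (2 ** c) <= B:
--         i = 2
--         while (i + 1) ** (2 ** c) <= B:
--             i += 1
--         f = i ** (2 ** c)
--         if f * f > B and f >= A:
--             best = c
--         c += 1
--     return best
-- ===== Notes on version B (the rewrite author's own statement) =====
-- stated objective: faster
-- what changed: A scans every base i in [2,B] and squares each to its final value; B loops over the possible squaring counts c (at most log log B of them) and for each c finds only the largest base with i^(2^c) <= B by a short scan bounded by B^(1/2^c), checking whether that base's chain stops exactly at c with final value >= A.
import Mathlib
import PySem

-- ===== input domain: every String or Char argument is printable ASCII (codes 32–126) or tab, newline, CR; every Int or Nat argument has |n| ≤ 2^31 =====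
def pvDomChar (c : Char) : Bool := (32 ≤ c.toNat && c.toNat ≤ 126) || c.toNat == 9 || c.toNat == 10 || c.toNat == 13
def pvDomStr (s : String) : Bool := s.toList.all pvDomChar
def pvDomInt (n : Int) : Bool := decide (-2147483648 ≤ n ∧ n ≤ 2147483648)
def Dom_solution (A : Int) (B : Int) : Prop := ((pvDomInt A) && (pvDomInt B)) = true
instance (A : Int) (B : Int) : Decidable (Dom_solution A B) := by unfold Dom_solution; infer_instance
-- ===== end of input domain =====

-- B replaces A's scan over every base i in [2,B] by a loop over the squaring count c,
-- finding the largest base for each c by a short scan (objective: faster).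
-- The Nat 'fuel' parameters below are pure totality devices: each is provably larger
-- than the number of iterations its Python while-loop performs, so the ports compute
-- exactly what the loops compute.

-- ===== PORT A =====
-- inner 'while i**2 <= B: i = i**2; count += 1' (runs < fuel times: i grows each step)
def sqLoopF (fuel : Nat) (B i count : Int) : Int × Int :=
  match fuel with
  | 0 => (i, count)
  | fuel + 1 => if i ^ 2 ≤ B then sqLoopF fuel B (i ^ 2) (count + 1) else (i, count)

-- the inner loop as A runs it, with sufficient fuel
def sqCall (B i : Int) : Int × Int := sqLoopF ((B - i).toNat + 1) B i 0

-- body of A's 'for i in range(2, B+1)' loop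
def stepA (A B maximum i : Int) : Int :=
  let p := sqCall B i
  if p.1 ≥ A then max maximum p.2 else maximum

def solution (A : Int) (B : Int) : Int :=
  (PySem.List.pyRange 2 (B + 1) 1).foldl (stepA A B) 0

-- ===== PORT B =====
-- inner 'while (i+1)**(2**c) <= B: i += 1' scan (runs < fuel times: i grows, i ≤ B)
def scanF (fuel : Nat) (c : Nat) (B i : Int) : Int :=
  match fuel with
  | 0 => i
  | fuel + 1 => if (i + 1) ^ (2 ^ c) ≤ B then scanF fuel c B (i + 1) else i

-- the scan as Source B runs it, starting at i = 2, with sufficient fuel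
def scanCall (c : Nat) (B : Int) : Int := scanF ((B - 2).toNat + 1) c B 2

-- outer 'while 2 ** (2 ** c) <= B' loop of Source B (runs < fuel times: c ≤ B while it runs)
def altF (fuel : Nat) (A B : Int) (c : Nat) (best : Int) : Int :=
  match fuel with
  | 0 => best
  | fuel + 1 =>
    if (2 : Int) ^ (2 ^ c) ≤ B then
      let i := scanCall c B
      let f := i ^ (2 ^ c)
      altF fuel A B (c + 1) (if f * f > B ∧ f ≥ A then (c : Int) else best)
    else best

def solution_alt (A : Int) (B : Int) : Int := altF (B.toNat + 1) A B 1 0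

-- ===== PRECONDITION & SPEC =====
def Spec_solution (A : Int) (B : Int) (out : Int) : Prop := out = solution_alt A B
instance (A : Int) (B : Int) (out : Int) : Decidable (Spec_solution A B out) := by unfold Spec_solution; infer_instance

-- ===== CLAIM (what is proved, stated in full; the proofs are below) =====
def Claim_equal_solution : Prop := ∀ (A : Int) (B : Int), Dom_solution A B → Spec_solution A B (solution A B)

-- ===== LEMMAS AND PROOFS =====

-- 'squaring count c is achieved by some base ≥ 2 whose final value is ≥ A'
def Qual (A B : Int) (c : Nat) : Prop :=
  ∃ i : Int, 2 ≤ i ∧ i ^ (2 ^ c) ≤ B ∧ B < i ^ (2 ^ (c + 1)) ∧ A ≤ i ^ (2 ^ c)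

theorem pow_pow_succ (i : Int) (c : Nat) : i ^ (2 ^ (c + 1)) = (i ^ (2 ^ c)) ^ 2 := by
  rw [← pow_mul]; ring_nf

theorem sq_pow_pow (i : Int) (c : Nat) : (i ^ 2) ^ (2 ^ c) = i ^ (2 ^ (c + 1)) := by
  rw [← pow_mul]; ring_nf

theorem stepA_eq (A B m i : Int) :
    stepA A B m i = if (sqCall B i).1 ≥ A then max m (sqCall B i).2 else m := rfl

theorem sqLoopF_spec (B : Int) (fuel : Nat) :
    ∀ i count : Int, 2 ≤ i → (B - i).toNat < fuel →
    ∃ c : Nat, sqLoopF fuel B i count = (i ^ (2 ^ c), count + (c : Int)) ∧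
      B < (i ^ (2 ^ c)) ^ 2 ∧ ∀ d : Nat, d < c → (i ^ (2 ^ d)) ^ 2 ≤ B := by
  induction fuel with
  | zero => intro i count _ hf; omega
  | succ fuel ih =>
    intro i count h2 hf
    rw [sqLoopF]
    by_cases hB : i ^ 2 ≤ B
    · have hlt : i < i ^ 2 := by nlinarith
      obtain ⟨c', hrec, hgt, hall⟩ := ih (i ^ 2) (count + 1) (by nlinarith) (by omega)
      rw [if_pos hB]
      refine ⟨c' + 1, ?_, ?_, ?_⟩
      · rw [hrec, sq_pow_pow]
        simp only [Prod.mk.injEq]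
        exact ⟨trivial, by push_cast; ring⟩
      · rw [← sq_pow_pow]
        exact hgt
      · intro d hd
        match d with
        | 0 => simpa using hB
        | d' + 1 =>
          have := hall d' (by omega)
          rw [sq_pow_pow] at this
          exact this
    · rw [if_neg hB]
      refine ⟨0, by simp, ?_, by omega⟩
      simp only [pow_zero, pow_one]
      omega

theorem sqCall_spec (B i : Int) (h2 : 2 ≤ i) :
    ∃ c : Nat, sqCall B i = (i ^ (2 ^ c), (c : Int)) ∧
      B < (i ^ (2 ^ c)) ^ 2 ∧ ∀ d : Nat, d < c → (i ^ (2 ^ d)) ^ 2 ≤ B := by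
  obtain ⟨c, hrec, hgt, hall⟩ := sqLoopF_spec B ((B - i).toNat + 1) i 0 h2 (by omega)
  exact ⟨c, by simpa using hrec, hgt, hall⟩

theorem pow_pow_le_pow_pow (i : Int) (h2 : 2 ≤ i) {a b : Nat} (hab : a ≤ b) :
    i ^ (2 ^ a) ≤ i ^ (2 ^ b) :=
  pow_le_pow_right₀ (by omega) (pow_le_pow_right₀ (by norm_num) hab)

-- the count returned by the inner loop is the unique c with i^(2^c) ≤ B < i^(2^(c+1))
theorem count_unique (B i : Int) (h2 : 2 ≤ i) {c c' : Nat}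
    (hle : i ^ (2 ^ c) ≤ B) (hgt : B < i ^ (2 ^ (c + 1)))
    (hgt' : B < (i ^ (2 ^ c')) ^ 2) (hall : ∀ d : Nat, d < c' → (i ^ (2 ^ d)) ^ 2 ≤ B) :
    c = c' := by
  rcases lt_trichotomy c c' with h | h | h
  · have := hall c h
    rw [← pow_pow_succ] at this
    omega
  · exact h
  · have h1 : c' + 1 ≤ c := h
    have := pow_pow_le_pow_pow i h2 h1
    rw [pow_pow_succ] at this
    omega

-- ---- A-side fold lemmas ----

theorem foldl_max_ge (A B : Int) (l : List Int) (acc : Int) :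
    acc ≤ l.foldl (stepA A B) acc := by
  induction l generalizing acc with
  | nil => simp
  | cons x l ih =>
    refine le_trans ?_ (ih _)
    rw [stepA_eq]
    split <;> simp

theorem foldl_max_mem (A B i : Int) (l : List Int) (hA : (sqCall B i).1 ≥ A) :
    ∀ acc : Int, i ∈ l → (sqCall B i).2 ≤ l.foldl (stepA A B) acc := by
  induction l with
  | nil => intro acc hi; simp at hi
  | cons x l ih =>
    intro acc hi
    rcases List.mem_cons.mp hi with rfl | hi
    · refine le_trans ?_ (foldl_max_ge A B l _)
      rw [stepA_eq, if_pos hA]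
      exact le_max_right _ _
    · exact ih _ hi

theorem foldl_max_cases (A B : Int) (l : List Int) (acc : Int) :
    l.foldl (stepA A B) acc = acc ∨
    ∃ i ∈ l, (sqCall B i).1 ≥ A ∧ l.foldl (stepA A B) acc = (sqCall B i).2 := by
  induction l generalizing acc with
  | nil => simp
  | cons x l ih =>
    rcases ih (stepA A B acc x) with h | ⟨i, hi, hA, h⟩
    · simp only [List.foldl_cons] at *
      rw [h, stepA_eq]
      by_cases hx : (sqCall B x).1 ≥ A
      · rw [if_pos hx]
        rcases max_choice acc (sqCall B x).2 with hm | hm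
        · left; exact hm
        · right; exact ⟨x, List.mem_cons_self, hx, hm⟩
      · left; rw [if_neg hx]
    · right; exact ⟨i, List.mem_cons_of_mem _ hi, hA, by simpa using h⟩

-- ---- B-side lemmas ----

theorem scanF_spec (c : Nat) (B : Int) (fuel : Nat) :
    ∀ i : Int, 2 ≤ i → i ^ (2 ^ c) ≤ B → (B - i).toNat < fuel →
    i ≤ scanF fuel c B i ∧ (scanF fuel c B i) ^ (2 ^ c) ≤ B ∧
      B < (scanF fuel c B i + 1) ^ (2 ^ c) := by
  induction fuel with
  | zero => intro i _ _ hf; omega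
  | succ fuel ih =>
    intro i h2 hle hf
    rw [scanF]
    by_cases hB : (i + 1) ^ (2 ^ c) ≤ B
    · rw [if_pos hB]
      have hstep : i + 1 ≤ (i + 1) ^ (2 ^ c) := le_self_pow₀ (by omega) (by positivity)
      obtain ⟨hge, hle', hgt⟩ := ih (i + 1) (by omega) hB (by omega)
      exact ⟨by omega, hle', hgt⟩
    · rw [if_neg hB]
      exact ⟨le_refl _, hle, by omega⟩

theorem scanCall_spec (c : Nat) (B : Int) (hB : (2 : Int) ^ (2 ^ c) ≤ B) :
    2 ≤ scanCall c B ∧ (scanCall c B) ^ (2 ^ c) ≤ B ∧ B < (scanCall c B + 1) ^ (2 ^ c) := by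
  obtain ⟨hge, hle, hgt⟩ := scanF_spec c B ((B - 2).toNat + 1) 2 (le_refl _) hB (by omega)
  exact ⟨hge, hle, hgt⟩

theorem scanCall_max (c : Nat) (B j : Int) (_h2 : 2 ≤ j) (hj : j ^ (2 ^ c) ≤ B)
    (hB : (2 : Int) ^ (2 ^ c) ≤ B) : j ≤ scanCall c B := by
  obtain ⟨_, _, hgt⟩ := scanCall_spec c B hB
  by_contra hc
  have h1 : scanCall c B + 1 ≤ j := by omega
  have := pow_le_pow_left₀ (by omega : (0:Int) ≤ scanCall c B + 1) h1 (2 ^ c)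
  omega

-- the condition Source B tests at count c (meaningful when the guard 2^(2^c) ≤ B holds)
def Cond (A B : Int) (c : Nat) : Prop :=
  (scanCall c B) ^ (2 ^ c) * (scanCall c B) ^ (2 ^ c) > B ∧ (scanCall c B) ^ (2 ^ c) ≥ A

theorem qual_iff_cond (A B : Int) (c : Nat) (hB : (2 : Int) ^ (2 ^ c) ≤ B) :
    Qual A B c ↔ Cond A B c := by
  obtain ⟨hge2, hle, _⟩ := scanCall_spec c B hB
  constructor
  · rintro ⟨i, h2, hiB, higt, hiA⟩
    have hir : i ≤ scanCall c B := scanCall_max c B i h2 hiB hB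
    have hpow : i ^ (2 ^ c) ≤ (scanCall c B) ^ (2 ^ c) :=
      pow_le_pow_left₀ (by omega) hir _
    have h0 : (0:Int) ≤ i ^ (2 ^ c) := by positivity
    rw [pow_pow_succ, sq] at higt
    constructor
    · have := mul_le_mul hpow hpow h0 (le_trans h0 hpow)
      omega
    · omega
  · rintro ⟨hgt, hA⟩
    refine ⟨scanCall c B, hge2, hle, ?_, hA⟩
    rw [pow_pow_succ, sq]; exact hgt

theorem qual_guard (A B : Int) (c : Nat) (hQ : Qual A B c) : (2 : Int) ^ (2 ^ c) ≤ B := by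
  obtain ⟨i, h2, hle, _, _⟩ := hQ
  calc (2 : Int) ^ (2 ^ c) ≤ i ^ (2 ^ c) := pow_le_pow_left₀ (by norm_num) h2 _
  _ ≤ B := hle

theorem altF_succ (A B : Int) (fuel : Nat) (c : Nat) (best : Int) :
    altF (fuel + 1) A B c best =
      if (2 : Int) ^ (2 ^ c) ≤ B then
        altF fuel A B (c + 1)
          (if (scanCall c B) ^ (2 ^ c) * (scanCall c B) ^ (2 ^ c) > B ∧
              (scanCall c B) ^ (2 ^ c) ≥ A then (c : Int) else best)
      else best := rfl

theorem altF_ge (A B : Int) (fuel : Nat) :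
    ∀ (c : Nat) (best : Int), best ≤ (c : Int) → best ≤ altF fuel A B c best := by
  induction fuel with
  | zero => intro c best _; exact le_refl _
  | succ fuel ih =>
    intro c best hbd
    rw [altF_succ]
    by_cases hg : (2 : Int) ^ (2 ^ c) ≤ B
    · rw [if_pos hg]
      by_cases hcond : (scanCall c B) ^ (2 ^ c) * (scanCall c B) ^ (2 ^ c) > B ∧
          (scanCall c B) ^ (2 ^ c) ≥ A
      · rw [if_pos hcond]
        exact le_trans hbd (ih (c + 1) (c : Int) (by push_cast; omega))
      · rw [if_neg hcond]
        exact ih (c + 1) best (by push_cast; omega)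
    · rw [if_neg hg]

theorem altF_le (A B : Int) (c' : Nat) (hg : (2 : Int) ^ (2 ^ c') ≤ B)
    (hcond : Cond A B c') (fuel : Nat) :
    ∀ (c : Nat) (best : Int), c ≤ c' → B.toNat + 1 ≤ fuel + c →
    (c' : Int) ≤ altF fuel A B c best := by
  induction fuel with
  | zero =>
    intro c best hcc hf
    exfalso
    have h1 : (c' : Int) < 2 ^ (2 ^ c') := by
      calc (c' : Int) < 2 ^ c' := by exact_mod_cast Nat.lt_two_pow_self
      _ ≤ 2 ^ (2 ^ c') := pow_le_pow_right₀ (by norm_num) (Nat.le_of_lt Nat.lt_two_pow_self)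
    omega
  | succ fuel ih =>
    intro c best hcc hf
    have hgc : (2 : Int) ^ (2 ^ c) ≤ B :=
      le_trans (pow_le_pow_right₀ (by norm_num) (pow_le_pow_right₀ (by norm_num) hcc)) hg
    rw [altF_succ, if_pos hgc]
    rcases Nat.eq_or_lt_of_le hcc with rfl | hlt
    · obtain ⟨hc1, hc2⟩ := hcond
      rw [if_pos ⟨hc1, hc2⟩]
      exact altF_ge A B fuel (c + 1) (c : Int) (by push_cast; omega)
    · by_cases hcond0 : (scanCall c B) ^ (2 ^ c) * (scanCall c B) ^ (2 ^ c) > B ∧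
          (scanCall c B) ^ (2 ^ c) ≥ A
      · rw [if_pos hcond0]; exact ih (c + 1) _ hlt (by omega)
      · rw [if_neg hcond0]; exact ih (c + 1) _ hlt (by omega)

theorem altF_cases (A B : Int) (fuel : Nat) :
    ∀ (c : Nat) (best : Int),
    altF fuel A B c best = best ∨
    ∃ c' : Nat, c ≤ c' ∧ (2 : Int) ^ (2 ^ c') ≤ B ∧ Cond A B c' ∧
      altF fuel A B c best = (c' : Int) := by
  induction fuel with
  | zero => intro c best; left; rfl
  | succ fuel ih =>
    intro c best
    rw [altF_succ]
    by_cases hg : (2 : Int) ^ (2 ^ c) ≤ B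
    · rw [if_pos hg]
      by_cases hcond : (scanCall c B) ^ (2 ^ c) * (scanCall c B) ^ (2 ^ c) > B ∧
          (scanCall c B) ^ (2 ^ c) ≥ A
      · rw [if_pos hcond]
        rcases ih (c + 1) (c : Int) with heq | ⟨c2, hcc, hg2, hcond2, heq⟩
        · exact Or.inr ⟨c, le_refl _, hg, hcond, heq⟩
        · exact Or.inr ⟨c2, by omega, hg2, hcond2, heq⟩
      · rw [if_neg hcond]
        rcases ih (c + 1) best with heq | ⟨c2, hcc, hg2, hcond2, heq⟩
        · exact Or.inl heq
        · exact Or.inr ⟨c2, by omega, hg2, hcond2, heq⟩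
    · rw [if_neg hg]; left; rfl

-- a base with chain data from sqCall_spec and count ≥ 1 yields Qual at that count
theorem qual_of_chain (A B i : Int) (c : Nat) (h2 : 2 ≤ i) (hc : 1 ≤ c)
    (hgt : B < (i ^ (2 ^ c)) ^ 2) (hall : ∀ d : Nat, d < c → (i ^ (2 ^ d)) ^ 2 ≤ B)
    (hA : A ≤ i ^ (2 ^ c)) : Qual A B c := by
  refine ⟨i, h2, ?_, ?_, hA⟩
  · have hch := hall (c - 1) (by omega)
    rw [← pow_pow_succ] at hch
    have hcc : c - 1 + 1 = c := by omega
    rw [hcc] at hch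
    exact hch
  · rw [pow_pow_succ]; exact hgt

-- ===== VERDICT (by name: the statement is the Claim_ definition above) =====
theorem solution_spec : Claim_equal_solution := by
  intro A B _
  unfold Spec_solution solution solution_alt
  apply le_antisymm
  · rcases foldl_max_cases A B (PySem.List.pyRange 2 (B + 1) 1) 0 with heq | ⟨i, hi, hA, heq⟩
    · rw [heq]; exact altF_ge A B (B.toNat + 1) 1 0 (by norm_num)
    · rw [heq]
      have hmem := (PySem.List.mem_pyRange_one).mp hi
      have h2 : (2 : Int) ≤ i := hmem.1
      obtain ⟨c, hrec, hgt, hall⟩ := sqCall_spec B i h2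
      rw [hrec] at hA ⊢
      rcases Nat.eq_zero_or_pos c with rfl | hc
      · simpa using altF_ge A B (B.toNat + 1) 1 0 (by norm_num)
      · have hQ : Qual A B c := qual_of_chain A B i c h2 hc hgt hall hA
        have hg := qual_guard A B c hQ
        have hcond := (qual_iff_cond A B c hg).mp hQ
        exact altF_le A B c hg hcond (B.toNat + 1) 1 0 hc (by omega)
  · rcases altF_cases A B (B.toNat + 1) 1 0 with heq | ⟨c, hc1, hg, hcond, heq⟩
    · rw [heq]; exact foldl_max_ge A B _ 0
    · rw [heq]
      have hQ : Qual A B c := (qual_iff_cond A B c hg).mpr hcond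
      obtain ⟨i, h2, hle, hgt, hA⟩ := hQ
      have hiB : i ≤ B := le_trans (le_self_pow₀ (by omega) (by positivity)) hle
      have hmem : i ∈ PySem.List.pyRange 2 (B + 1) 1 :=
        (PySem.List.mem_pyRange_one).mpr ⟨h2, by omega⟩
      obtain ⟨c0, hrec, hgt0, hall0⟩ := sqCall_spec B i h2
      have hc0 : c = c0 := count_unique B i h2 hle hgt hgt0 hall0
      subst hc0
      have hA' : (sqCall B i).1 ≥ A := by rw [hrec]; exact hA
      have hf := foldl_max_mem A B i (PySem.List.pyRange 2 (B + 1) 1) hA' 0 hmem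
      rw [hrec] at hf
      simpa using hf
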